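-- pv_equiv track=rewrite | github.com/hozzang-98/Study | 프로그래머스/2/389479. 서버 증설 횟수/서버 증설 횟수.py | solution
-- ===== SOURCE A (Python) =====
-- def solution(players, m, k):
--
--     answer = 0
--
--     server = [0 for i in range(len(players))]
--
--     for idx, player in enumerate(players):
--
--         need_server_cnt = 0
--
--         if player >= m:
--
--             need_server_cnt = player // m
--
--             if server[idx] < need_server_cnt:
--
--                 add_server_cnt = need_server_cnt - server[idx]
--
--                 if need_server_cnt * m <= player < (need_server_cnt+1) * m:
--
--                     answer += add_server_cnt
--
--                     for i in range(k):
--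
--                         if idx + i < len(server):
--
--                             server[idx+i] += add_server_cnt
--
--                         else: break
--
--     return answer
-- ===== SOURCE B (Python) =====
-- def solution(players, m, k):
--     # Difference-array one pass: `cur` = servers currently running, additions
--     # expire after k hours via a single decrement recorded in `diff`.
--     n = len(players)
--     diff = [0] * (n + 1)
--     cur = 0
--     answer = 0
--     for i, p in enumerate(players):
--         cur += diff[i]
--         if p >= m:
--             need = p // m
--             if cur < need:
--                 add = need - cur
--                 answer += add
--                 if k > 0:
--                     cur += add
--                     diff[min(i + k, n)] -= add
--     return answer
-- ===== Notes on version B (the rewrite author's own statement) =====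
-- stated objective: faster
-- what changed: Replaced the per-addition O(k) inner write loop over a server array by a difference array with a running active-server count, so each hour does O(1) work.
-- outside the precondition, e.g. on solution([-2], -2, 1): A returns 0, B returns 1; on solution([3], 0, 1): A raises ZeroDivisionError, B raises ZeroDivisionError
import Mathlib
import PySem

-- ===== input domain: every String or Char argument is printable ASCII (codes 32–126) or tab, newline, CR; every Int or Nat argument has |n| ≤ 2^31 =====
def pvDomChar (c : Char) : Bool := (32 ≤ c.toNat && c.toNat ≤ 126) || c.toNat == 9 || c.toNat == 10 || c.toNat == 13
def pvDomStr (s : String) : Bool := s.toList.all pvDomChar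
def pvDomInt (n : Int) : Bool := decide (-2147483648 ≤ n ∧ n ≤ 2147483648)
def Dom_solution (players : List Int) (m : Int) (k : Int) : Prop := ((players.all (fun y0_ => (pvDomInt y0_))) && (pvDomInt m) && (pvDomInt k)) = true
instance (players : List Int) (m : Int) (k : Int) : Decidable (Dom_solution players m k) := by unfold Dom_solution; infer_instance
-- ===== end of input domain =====

-- B replaces A's O(k) inner server-array write loop by a difference array with a
-- running active-server count (O(1) per hour); equivalence is proved for m ≥ 1.

-- ===== PORT A =====
-- inner loop 'for i in range(k): if idx+i < len(server): server[idx+i] += add else break'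
-- (indices idx+i are nonnegative and checked in range, so List.set/getD are exact here)
-- Python's range is lazy, so the loop is ported as a counter recursion over i < k
def innerA (idx : Nat) (add k : Int) (i : Int) (server : List Int) : List Int :=
  if _h : i < k then
    if (idx : Int) + i < server.length then
      innerA idx add k (i + 1) (server.set (idx + i.toNat) (server.getD (idx + i.toNat) 0 + add))
    else server
  else server
termination_by (k - i).toNat
decreasing_by omega

-- main loop over enumerate(players); server[idx] is always in range, getD is exact
def loopA (m k : Int) : List Int → Nat → Int → List Int → Int
  | [], _, ans, _ => ans
  | p :: rest, idx, ans, server =>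
    if m ≤ p then
      let need := PySem.Int.floordiv p m
      let s := server.getD idx 0
      if s < need then
        let add := need - s
        if need * m ≤ p ∧ p < (need + 1) * m then
          loopA m k rest (idx + 1) (ans + add) (innerA idx add k 0 server)
        else loopA m k rest (idx + 1) ans server
      else loopA m k rest (idx + 1) ans server
    else loopA m k rest (idx + 1) ans server

def solution (players : List Int) (m : Int) (k : Int) : Int :=
  loopA m k players 0 0 (List.replicate players.length 0)

-- ===== PORT B =====
-- one pass; cur = running active-server count, diff = difference array of expirations;
-- min(i+k, n) with k > 0 makes i+k nonnegative, so Nat arithmetic is exact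
def loopB (m k : Int) (n : Nat) : List Int → Nat → Int → Int → List Int → Int
  | [], _, ans, _, _ => ans
  | p :: rest, i, ans, cur, diff =>
    let cur' := cur + diff.getD i 0
    if m ≤ p then
      let need := PySem.Int.floordiv p m
      if cur' < need then
        let add := need - cur'
        if 0 < k then
          let j := min (i + k.toNat) n
          loopB m k n rest (i + 1) (ans + add) (cur' + add) (diff.set j (diff.getD j 0 - add))
        else loopB m k n rest (i + 1) (ans + add) cur' diff
      else loopB m k n rest (i + 1) ans cur' diff
    else loopB m k n rest (i + 1) ans cur' diff

def solution_alt (players : List Int) (m : Int) (k : Int) : Int :=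
  loopB m k players.length players 0 0 0 (List.replicate (players.length + 1) 0)

-- ===== PRECONDITION & SPEC =====
-- Pre_ excludes m ≤ 0: for m = 0 A raises ZeroDivisionError, and for m < 0 (outside the
-- problem's natural domain of a positive per-server capacity) A's floor-division bracket
-- guard 'need*m <= player < (need+1)*m' is unsatisfiable, so A accidentally returns 0.
def Pre_solution (players : List Int) (m : Int) (k : Int) : Prop := 1 ≤ m
instance (players : List Int) (m : Int) (k : Int) : Decidable (Pre_solution players m k) := by unfold Pre_solution; infer_instance
def pvWitness_solution : List Int × Int × Int := ([3, 5, 1], 2, 2)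
def Spec_solution (players : List Int) (m : Int) (k : Int) (out : Int) : Prop := out = solution_alt players m k
instance (players : List Int) (m : Int) (k : Int) (out : Int) : Decidable (Spec_solution players m k out) := by unfold Spec_solution; infer_instance

-- ===== CLAIM (what is proved, stated in full; the proofs are below) =====
def Claim_equal_solution : Prop := ∀ (players : List Int) (m : Int) (k : Int), Dom_solution players m k → Pre_solution players m k → Spec_solution players m k (solution players m k)

-- ===== LEMMAS AND PROOFS =====

-- point update of a list shifts its sum by the difference
lemma sum_set' (L : List Int) (q : Nat) (x : Int) (h : q < L.length) :
    (L.set q x).sum = L.sum + x - L.getD q 0 := by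
  have h1 := List.sum_set L q x
  have h2 := List.sum_set L q (L[q])
  rw [List.set_getElem_self h] at h2
  rw [if_pos h] at h1 h2
  rw [List.getD_eq_getElem L 0 h]
  linarith [h1, h2]

-- sum of a window of a difference array after a point update
lemma sum_drop_take_set (l : List Int) (e : Nat) (x : Int) (a b : Nat) (he : e < l.length) :
    (((l.set e x).drop a).take b).sum
      = ((l.drop a).take b).sum + (if a ≤ e ∧ e < a + b then x - l.getD e 0 else 0) := by
  rw [List.drop_set]
  by_cases h1 : e < a
  · rw [if_pos h1, if_neg (by omega)]
    simp
  · rw [if_neg h1, List.take_set]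
    by_cases h2 : e < a + b
    · have hlt : e - a < (List.take b (List.drop a l)).length := by
        simp [List.length_take, List.length_drop]; omega
      rw [sum_set' _ _ _ hlt, if_pos ⟨by omega, h2⟩]
      have hget : (List.take b (List.drop a l)).getD (e - a) 0 = l.getD e 0 := by
        have hea : a + (e - a) = e := by omega
        rw [List.getD_eq_getElem _ _ hlt, List.getElem_take, List.getElem_drop,
          List.getD_eq_getElem l 0 he]
        simp [hea]
      rw [hget]; ring
    · rw [List.set_eq_of_length_le (by simp [List.length_take, List.length_drop]; omega),
        if_neg (by omega)]
      simp

-- innerA adds `add` exactly on the index window [idx + a, min (idx + k, length))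
lemma innerA_spec (idx : Nat) (add k : Int) :
    ∀ (fuel : Nat) (a : Int) (server : List Int), 0 ≤ a → (k - a).toNat ≤ fuel →
      (innerA idx add k a server).length = server.length ∧
      ∀ j, j < server.length →
        (innerA idx add k a server).getD j 0
          = server.getD j 0 +
            (if idx + a.toNat ≤ j ∧ j < min (idx + k.toNat) server.length then add else 0) := by
  intro fuel
  induction fuel with
  | zero =>
    intro a server ha hf
    rw [innerA, dif_neg (by omega)]
    refine ⟨rfl, ?_⟩
    intro j hj
    rw [if_neg (by omega)]
    simp
  | succ fuel ihf =>
    intro a server ha hf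
    by_cases hka : k ≤ a
    · rw [innerA, dif_neg (by omega)]
      refine ⟨rfl, ?_⟩
      intro j hj
      rw [if_neg (by omega)]
      simp
    · push_neg at hka
      rw [innerA, dif_pos (by omega)]
      by_cases hin : (idx : Int) + a < (server.length : Int)
      · rw [if_pos hin]
        obtain ⟨hl, hg⟩ :=
          ihf (a + 1) (server.set (idx + a.toNat) (server.getD (idx + a.toNat) 0 + add))
            (by omega) (by omega)
        rw [List.length_set] at hl
        refine ⟨hl, ?_⟩
        intro j hj
        rw [hg j (by rw [List.length_set]; exact hj), List.length_set]
        have hidx : idx + a.toNat < server.length := by omega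
        have hset : (server.set (idx + a.toNat) (server.getD (idx + a.toNat) 0 + add)).getD j 0
            = if idx + a.toNat = j then server.getD (idx + a.toNat) 0 + add
              else server.getD j 0 := by
          rw [List.getD_eq_getElem _ _ (by rw [List.length_set]; exact hj), List.getElem_set]
          split_ifs with hq
          · rw [List.getD_eq_getElem _ _ hidx]
          · rw [List.getD_eq_getElem _ _ hj]
        rw [hset]
        by_cases hq : idx + a.toNat = j
        · rw [if_pos hq, ← hq]
          split_ifs <;> first | ring1 | (exfalso; omega)
        · rw [if_neg hq]
          split_ifs <;> first | rfl | (exfalso; omega)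
      · rw [if_neg hin]
        refine ⟨rfl, ?_⟩
        intro j hj
        rw [if_neg (by omega)]
        simp

-- main simulation invariant: loopA's server array agrees with loopB's (cur, diff)
lemma loop_eq (m k : Int) (hm : 1 ≤ m) (n : Nat) :
    ∀ (rest : List Int) (i : Nat) (ans cur : Int) (server diff : List Int),
      i + rest.length = n →
      server.length = n →
      diff.length = n + 1 →
      (∀ j, i ≤ j → j < n →
        server.getD j 0 = cur + ((diff.drop i).take (j + 1 - i)).sum) →
      loopA m k rest i ans server = loopB m k n rest i ans cur diff := by
  intro rest
  induction rest with
  | nil => intro i ans cur server diff _ _ _ _; simp [loopA, loopB]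
  | cons p rest ih =>
    intro i ans cur server diff hlen hs hd hinv
    simp only [List.length_cons] at hlen
    have hi : i < n := by omega
    have hdi : i < diff.length := by omega
    have hdrop : diff.drop i = diff.getD i 0 :: diff.drop (i + 1) := by
      rw [List.getD_eq_getElem diff 0 hdi]; exact List.drop_eq_getElem_cons hdi
    have hinv' : ∀ j, i ≤ j → j < n →
        server.getD j 0 = (cur + diff.getD i 0) + ((diff.drop (i + 1)).take (j - i)).sum := by
      intro j hij hj
      have h0 := hinv j hij hj
      rw [hdrop, show j + 1 - i = (j - i) + 1 from by omega, List.take_succ_cons,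
        List.sum_cons] at h0
      rw [h0]; ring
    have hinv'' : ∀ j, i + 1 ≤ j → j < n →
        server.getD j 0 = (cur + diff.getD i 0) + ((diff.drop (i + 1)).take (j + 1 - (i + 1))).sum := by
      intro j hij hj
      rw [show j + 1 - (i + 1) = j - i from by omega]
      exact hinv' j (by omega) hj
    have hsi : server.getD i 0 = cur + diff.getD i 0 := by
      have h0 := hinv' i le_rfl hi
      simpa using h0
    simp only [loopA, loopB]
    by_cases hp : m ≤ p
    · rw [if_pos hp, if_pos hp, hsi]
      by_cases hc : cur + diff.getD i 0 < PySem.Int.floordiv p m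
      · rw [if_pos hc, if_pos hc]
        have hbr : PySem.Int.floordiv p m * m ≤ p ∧ p < (PySem.Int.floordiv p m + 1) * m :=
          (PySem.Int.floordiv_eq_iff_of_pos (by omega)).mp rfl
        rw [if_pos hbr]
        by_cases hk : (0 : Int) < k
        · rw [if_pos hk]
          obtain ⟨hLlen, hLget⟩ :=
            innerA_spec i (PySem.Int.floordiv p m - (cur + diff.getD i 0)) k
              (k - 0).toNat 0 server le_rfl le_rfl
          apply ih (i + 1) _ _ _ _ (by omega) (by rw [hLlen, hs]) (by rw [List.length_set, hd])
          intro j hij hj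
          rw [hLget j (by omega), hs, show j + 1 - (i + 1) = j - i from by omega,
            sum_drop_take_set diff (min (i + k.toNat) n) _ (i + 1) (j - i) (by omega),
            hinv' j (by omega) hj]
          split_ifs <;> first | ring1 | (exfalso; omega)
        · rw [if_neg hk, innerA, dif_neg (by omega)]
          exact ih (i + 1) _ _ _ _ (by omega) hs hd hinv''
      · rw [if_neg hc, if_neg hc]
        exact ih (i + 1) _ _ _ _ (by omega) hs hd hinv''
    · rw [if_neg hp, if_neg hp]
      exact ih (i + 1) _ _ _ _ (by omega) hs hd hinv''

-- ===== VERDICT (by name: the statement is the Claim_ definition above) =====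
theorem solution_spec : Claim_equal_solution := by
  intro players m k _ hm
  show _ = _
  unfold solution solution_alt
  apply loop_eq m k hm players.length players 0 0 0
  · simp
  · simp
  · simp
  · intro j h0 hj
    simp [List.getD_eq_getElem?_getD, hj]
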